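-- pv_equiv track=rewrite | github.com/jsenellart/reproduced_papers | ObliQ/cvar-vqe/lib/Gen_vqe_lib/helpers/qwc.py | extract_measurement_bases
-- ===== SOURCE A (Python) =====
-- def extract_measurement_bases(group_data):
--     """
--     Extract a suitable measurement base from the provided group data.
--
--     Parameters:
--     - group_data (list of tuples): List containing tuples where the second element is a string of operators.
--
--     Returns:
--     - str: Measurement base string.
--     """
--     num_qubits = len(group_data[0][1])
--     measurement_base = ''
--
--     for i in range(num_qubits):
--         # Collect all operators at position i
--         operators_at_i = [term[1][i] for term in group_data]
--
--         # Check for a common non-identity operator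
--         non_identity_operators = set(operators_at_i) - {'I'}
--         if len(non_identity_operators) == 1:
--             # There is a single non-identity operator common to all terms
--             measurement_base += non_identity_operators.pop()
--         else:
--             # Default to 'Z' if there's no common non-identity operator or multiple different ones
--             measurement_base += 'Z'
--
--     return measurement_base
-- ===== SOURCE B (Python) =====
-- _CONFLICT = object()  # two different non-'I' operators seen at this position
--
--
-- def _upd(a, c):
--     """Fold one operator char into a position accumulator.
--
--     a is None (only 'I' seen so far), a single operator char, or _CONFLICT."""
--     if c == 'I':
--         return a
--     if a is None:
--         return c
--     if isinstance(a, str) and a != c: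
--         return _CONFLICT
--     return a
--
--
-- def extract_measurement_bases(group_data):
--     """One pass over the terms maintaining a per-qubit accumulator,
--     instead of re-scanning every term and building a set for each qubit."""
--     num_qubits = len(group_data[0][1])
--     acc = [None] * num_qubits
--     for term in group_data:
--         ops = term[1]
--         acc = [_upd(a, ops[i]) for i, a in enumerate(acc)]
--     return ''.join(a if isinstance(a, str) else 'Z' for a in acc)
-- ===== Notes on version B (the rewrite author's own statement) =====
-- stated objective: alternative
-- what changed: Instead of scanning all terms and building a set of operators for every qubit position, B makes one pass over the terms, folding each term's operators into a per-position accumulator (identity-so-far / unique operator / conflict) and rendering the accumulators at the end.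
import Mathlib
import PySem

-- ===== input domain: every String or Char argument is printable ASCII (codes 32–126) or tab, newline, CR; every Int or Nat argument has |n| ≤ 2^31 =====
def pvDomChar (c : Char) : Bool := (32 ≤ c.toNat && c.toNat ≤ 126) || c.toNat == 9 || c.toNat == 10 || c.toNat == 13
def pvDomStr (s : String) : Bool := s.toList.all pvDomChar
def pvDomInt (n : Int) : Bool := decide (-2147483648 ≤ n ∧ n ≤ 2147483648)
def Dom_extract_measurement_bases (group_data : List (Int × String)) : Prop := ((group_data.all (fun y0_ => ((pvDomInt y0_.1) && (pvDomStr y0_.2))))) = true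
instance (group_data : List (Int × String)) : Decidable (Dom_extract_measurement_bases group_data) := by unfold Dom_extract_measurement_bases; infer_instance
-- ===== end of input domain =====

-- B makes one pass over the terms with per-qubit accumulators instead of building a set per qubit; same cost, different decomposition.


-- ===== PORT A =====
-- Literal port of A: for each qubit position, collect the operators of all terms,
-- remove 'I' as a set difference, and append the unique survivor (else 'Z').
-- group_data[0] / term[1][i] raise IndexError in Python; the PySem primitives return
-- none there and those inputs are excluded by Pre_ (the .getD sentinels are never read
-- inside Pre_). set.pop() on a set known to have exactly one element is that element,
-- ported as .headD — exact here.
def extract_measurement_bases (group_data : List (Int × String)) : String :=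
  let num_qubits : Int := PySem.Str.len ((PySem.List.pyGet? group_data 0).getD (0, "")).2
  let base : List Char :=
    (PySem.List.pyRange 0 num_qubits 1).foldl (fun measurement_base i =>
      let operators_at_i : List Char :=
        group_data.map (fun term => (PySem.Str.pyGet? term.2 i).getD ' ')
      let non_identity_operators : PySem.Set Char :=
        PySem.Set.diff (PySem.Set.ofList operators_at_i) (PySem.Set.ofList ['I'])
      if PySem.Set.len non_identity_operators == 1 then
        measurement_base ++ [non_identity_operators.headD ' ']
      else
        measurement_base ++ ['Z']) []
  String.ofList base

-- ===== PORT B =====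
-- Per-position accumulator: none = only 'I' seen, some (some c) = unique non-'I' c,
-- some none = conflict (two different non-'I' operators).
def pvUpd (a : Option (Option Char)) (c : Char) : Option (Option Char) :=
  if c = 'I' then a
  else
    match a with
    | none => some (some c)
    | some (some c') => if c' = c then some (some c') else some none
    | some none => some none

def pvRender : Option (Option Char) → Char
  | some (some c) => c
  | _ => 'Z'

-- Literal port of B: one fold over the terms, each term updating every position's
-- accumulator (enumerate, as Source B does); render at the end. Same .getD sentinel
-- convention as port A on inputs Pre_ excludes.
def extract_measurement_bases_alt (group_data : List (Int × String)) : String :=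
  let num_qubits : Nat := ((PySem.List.pyGet? group_data 0).getD (0, "")).2.toList.length
  let acc0 : List (Option (Option Char)) := List.replicate num_qubits none
  let acc := group_data.foldl (fun acc term =>
    (PySem.List.enumerate acc).map
      (fun p => pvUpd p.2 ((PySem.Str.pyGet? term.2 p.1).getD ' '))) acc0
  String.ofList (acc.map pvRender)

-- ===== PRECONDITION & SPEC =====
-- Pre_ excludes exactly the inputs where Python A raises IndexError: the empty list
-- (group_data[0]) and lists whose later terms are shorter than the first (term[1][i]).
def Pre_extract_measurement_bases (group_data : List (Int × String)) : Prop :=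
  group_data ≠ [] ∧
  ∀ t ∈ group_data, (group_data.headD (0, "")).2.toList.length ≤ t.2.toList.length
instance (group_data : List (Int × String)) : Decidable (Pre_extract_measurement_bases group_data) := by unfold Pre_extract_measurement_bases; infer_instance
def pvWitness_extract_measurement_bases : (List (Int × String)) := [(1, "XI"), (-1, "XZ")]
def Spec_extract_measurement_bases (group_data : List (Int × String)) (out : String) : Prop := out = extract_measurement_bases_alt group_data
instance (group_data : List (Int × String)) (out : String) : Decidable (Spec_extract_measurement_bases group_data out) := by unfold Spec_extract_measurement_bases; infer_instance

-- ===== CLAIM (what is proved, stated in full; the proofs are below) =====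
def Claim_equal_extract_measurement_bases : Prop := ∀ (group_data : List (Int × String)), Dom_extract_measurement_bases group_data → Pre_extract_measurement_bases group_data → Spec_extract_measurement_bases group_data (extract_measurement_bases group_data)

-- ===== LEMMAS AND PROOFS =====

-- The B-state determined by the list of distinct non-'I' operators seen so far.
def pvStateOf : List Char → Option (Option Char)
  | [] => none
  | [c] => some (some c)
  | _ :: _ :: _ => some none

lemma pvStateOf_long (l : List Char) (h : 2 ≤ l.length) : pvStateOf l = some none := by
  match l with
  | [] => simp at h
  | [_] => simp at h
  | _ :: _ :: _ => rfl

lemma pvUpd_add (seen : List Char) (c : Char) (hc : c ≠ 'I') :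
    pvUpd (pvStateOf seen) c = pvStateOf (PySem.Set.add seen c) := by
  match seen with
  | [] => simp [pvUpd, pvStateOf, PySem.Set.add, PySem.Set.contains, hc]
  | [c'] =>
    by_cases h : c' = c
    · simp [pvUpd, pvStateOf, PySem.Set.add, PySem.Set.contains, hc, h]
    · simp [pvUpd, pvStateOf, PySem.Set.add, PySem.Set.contains, hc, h,
        Ne.symm h]
  | c1 :: c2 :: rest =>
    have h2 : 2 ≤ (PySem.Set.add (c1 :: c2 :: rest) c).length := by
      unfold PySem.Set.add; split <;> simp
    rw [pvStateOf_long _ h2]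
    simp [pvUpd, pvStateOf, hc]

lemma contains_filter_notI (s : List Char) (c : Char) (hc : c ≠ 'I') :
    (s.filter (fun x => !(x == 'I'))).contains c = s.contains c := by
  induction s with
  | nil => rfl
  | cons a s ih =>
    by_cases h : a = 'I'
    · subst h
      simp [hc]
    · simp [h, hc]

-- Invariant: folding ops through pvUpd from the state of `s` lands in the state of
-- pythonic set accumulation of ops into s, everything seen through the non-'I' filter.
lemma pvUpd_inv (ops : List Char) :
    ∀ s : List Char,
      ops.foldl pvUpd (pvStateOf (s.filter (fun x => !(x == 'I'))))
        = pvStateOf ((ops.foldl PySem.Set.add s).filter (fun x => !(x == 'I'))) := by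
  induction ops with
  | nil => intro s; rfl
  | cons c ops ih =>
    intro s
    by_cases hc : c = 'I'
    · subst hc
      have h1 : pvUpd (pvStateOf (s.filter (fun x => !(x == 'I')))) 'I'
          = pvStateOf (s.filter (fun x => !(x == 'I'))) := by
        simp [pvUpd]
      have h2 : (PySem.Set.add s 'I').filter (fun x => !(x == 'I'))
          = s.filter (fun x => !(x == 'I')) := by
        unfold PySem.Set.add
        split
        · rfl
        · simp
      have := ih (PySem.Set.add s 'I')
      rw [h2] at this
      simpa [h1] using this
    · have hadd : (PySem.Set.add s c).filter (fun x => !(x == 'I'))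
          = PySem.Set.add (s.filter (fun x => !(x == 'I'))) c := by
        unfold PySem.Set.add
        rw [PySem.Set.contains, PySem.Set.contains, contains_filter_notI s c hc]
        split
        · rfl
        · simp [List.filter_append, hc]
      have := ih (PySem.Set.add s c)
      simp only [List.foldl_cons]
      rw [pvUpd_add _ _ hc, ← hadd, this]

lemma diff_singletonI (s : List Char) :
    PySem.Set.diff s (PySem.Set.ofList ['I']) = s.filter (fun x => !(x == 'I')) := by
  have h : PySem.Set.ofList ['I'] = ['I'] := rfl
  rw [h]
  unfold PySem.Set.diff
  congr 1
  funext x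
  by_cases hx : x = 'I' <;> simp [PySem.Set.contains, hx]

-- Per-column equality: A's set computation and B's accumulator agree on any column.
lemma col_eq (ops : List Char) :
    (if PySem.Set.len
          (PySem.Set.diff (PySem.Set.ofList ops) (PySem.Set.ofList ['I'])) == 1
      then (PySem.Set.diff (PySem.Set.ofList ops)
              (PySem.Set.ofList ['I'])).headD ' '
      else 'Z')
      = pvRender (ops.foldl pvUpd none) := by
  have hfold : ops.foldl pvUpd none
      = pvStateOf ((PySem.Set.ofList ops).filter (fun x => !(x == 'I'))) := by
    have := pvUpd_inv ops []
    simpa [pvStateOf, PySem.Set.ofList, PySem.Set.empty] using this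
  rw [hfold, diff_singletonI]
  rcases h : (PySem.Set.ofList ops).filter (fun x => !(x == 'I')) with _ | ⟨c, _ | ⟨c', d⟩⟩
  · simp [PySem.Set.len, pvStateOf, pvRender]
  · simp [PySem.Set.len, pvStateOf, pvRender]
  · simp [PySem.Set.len, pvStateOf, pvRender]
    omega

-- enumerate of a mapped enumerate keeps the indices.
lemma enum_map_enum {β γ : Type} (g : Int × β → γ) :
    ∀ (xs : List β) (s : Int),
      PySem.List.enumerate ((PySem.List.enumerate xs s).map g) s
        = (PySem.List.enumerate xs s).map (fun p => (p.1, g p)) := by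
  intro xs
  induction xs with
  | nil => intro s; rfl
  | cons x xs ih =>
    intro s
    simp [PySem.List.enumerate_cons, ih (s + 1)]

-- Loop transposition: B's term-major fold equals, at each position, a column fold.
lemma foldl_transpose (terms : List (Int × String)) :
    ∀ acc : List (Option (Option Char)),
      terms.foldl (fun acc term =>
          (PySem.List.enumerate acc).map
            (fun p => pvUpd p.2 ((PySem.Str.pyGet? term.2 p.1).getD ' '))) acc
        = (PySem.List.enumerate acc).map
            (fun p => (terms.map
                (fun t => (PySem.Str.pyGet? t.2 p.1).getD ' ')).foldl pvUpd p.2) := by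
  induction terms with
  | nil =>
    intro acc
    simp [PySem.List.map_snd_enumerate]
  | cons t ts ih =>
    intro acc
    simp only [List.foldl_cons]
    rw [ih, enum_map_enum]
    simp [List.map_map, Function.comp]

lemma enumerate_replicate {β : Type} (a : β) :
    ∀ (n : Nat) (s : Int),
      PySem.List.enumerate (List.replicate n a) s
        = (PySem.List.pyRange s (s + n)).map (fun i => (i, a)) := by
  intro n
  induction n with
  | zero =>
    intro s
    rw [List.replicate_zero, show ((s + (0 : Nat) : Int)) = s by simp,
      PySem.List.pyRange_one_eq_nil le_rfl]
    rfl
  | succ n ih =>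
    intro s
    have hcons : PySem.List.pyRange s (s + (n + 1 : Nat))
        = s :: PySem.List.pyRange (s + 1) ((s + 1) + n) := by
      rw [PySem.List.pyRange_one_cons (by push_cast; omega)]
      congr 1
      push_cast
      ring
    rw [List.replicate_succ, PySem.List.enumerate_cons, ih (s + 1), hcons]
    simp

lemma pv_append_ite {P : Prop} [Decidable P] (mb : List Char) (c d : Char) :
    (if P then mb ++ [c] else mb ++ [d]) = mb ++ [if P then c else d] := by
  split <;> rfl

-- ===== VERDICT (by name: the statement is the Claim_ definition above) =====
set_option maxHeartbeats 1000000 in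
theorem extract_measurement_bases_spec : Claim_equal_extract_measurement_bases := by
  intro group_data _hDom _hPre
  unfold Spec_extract_measurement_bases
  unfold extract_measurement_bases extract_measurement_bases_alt
  set g0 := (PySem.List.pyGet? group_data 0).getD (0, "") with hg0
  -- A side: turn the appending fold into a map over the range
  have hsplit :
      (fun (measurement_base : List Char) (i : Int) =>
        let operators_at_i : List Char :=
          group_data.map (fun term => (PySem.Str.pyGet? term.2 i).getD ' ')
        let non_identity_operators : PySem.Set Char :=
          PySem.Set.diff (PySem.Set.ofList operators_at_i) (PySem.Set.ofList ['I'])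
        if PySem.Set.len non_identity_operators == 1 then
          measurement_base ++ [non_identity_operators.headD ' ']
        else
          measurement_base ++ ['Z'])
      = (fun measurement_base i => measurement_base ++
          [if PySem.Set.len
              (PySem.Set.diff
                (PySem.Set.ofList
                  (group_data.map (fun term => (PySem.Str.pyGet? term.2 i).getD ' ')))
                (PySem.Set.ofList ['I'])) == 1
            then (PySem.Set.diff
                (PySem.Set.ofList
                  (group_data.map (fun term => (PySem.Str.pyGet? term.2 i).getD ' ')))
                (PySem.Set.ofList ['I'])).headD ' '
            else 'Z']) := by
    funext mb i
    exact pv_append_ite _ _ _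
  simp only [hsplit, PySem.List.foldl_append_singleton_eq_map, List.nil_append,
    foldl_transpose, enumerate_replicate, List.map_map]
  simp only [PySem.Str.len_eq, zero_add]
  refine congrArg String.ofList (List.map_congr_left fun i _ => ?_)
  simp only [Function.comp_apply]
  exact col_eq _
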